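-- pv_equiv track=rewrite | github.com/hzfsls/RepoC2Rust | script/run.py | as_bool_removal
-- ===== SOURCE A (Python) =====
-- def as_bool_removal(code):
--     ret = []
--     sub = ".as_bool()"
--     start = 0
--     while True:
--         start = code.find(sub, start)
--         if start == -1:
--             break
--         new_code = code[:start] + code[start + len(sub) :]
--         ret.append(new_code)
--         start += len(sub)
--     return ret
-- ===== SOURCE B (Python) =====
-- def as_bool_removal(code):
--     sub = ".as_bool()"
--     parts = code.split(sub)
--     ret = []
--     for i in range(len(parts) - 1):
--         ret.append(sub.join(parts[:i] + ["".join(parts[i:i + 2])] + parts[i + 2:]))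
--     return ret
-- ===== Notes on version B (the rewrite author's own statement) =====
-- stated objective: alternative
-- what changed: Replaces the find-from-index while-loop that re-slices the whole string per match with a single split on '.as_bool()' followed by rejoining the pieces with one adjacent pair merged per variant.
import Mathlib
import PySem

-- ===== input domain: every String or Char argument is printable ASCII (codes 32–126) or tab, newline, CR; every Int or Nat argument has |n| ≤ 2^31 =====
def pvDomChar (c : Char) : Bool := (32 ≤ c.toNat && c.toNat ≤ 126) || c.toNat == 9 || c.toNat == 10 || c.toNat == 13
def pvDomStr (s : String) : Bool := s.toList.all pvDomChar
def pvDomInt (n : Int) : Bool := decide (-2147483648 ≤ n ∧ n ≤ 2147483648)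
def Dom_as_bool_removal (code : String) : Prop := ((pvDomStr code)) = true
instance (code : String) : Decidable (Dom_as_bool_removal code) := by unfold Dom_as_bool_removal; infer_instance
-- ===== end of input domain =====

-- B replaces A's find-from-index while-loop (which re-slices the whole string per match)
-- by one split on ".as_bool()" and a rejoin with one adjacent pair of pieces merged per
-- variant (objective: alternative decomposition, same asymptotic cost).

-- the literal ".as_bool()" both Pythons hold in their local variable `sub`
def pvSub : List Char := ".as_bool()".toList

-- ===== PORT A =====
-- the `while True: start = code.find(sub, start); …` loop of A; `fuel` only makes the
-- recursion structural (as_bool_removal passes more fuel than the loop can iterate)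
def asBoolGo (cs : List Char) : Nat → Nat → List (List Char)
  | 0, _ => []
  | fuel + 1, start =>
      let p := PySem.Chars.findFrom cs pvSub (start : Int)
      if p = -1 then []
      else
        (PySem.List.slice cs none (some p)
            ++ PySem.List.slice cs (some (p + (pvSub.length : Int))) none)
          :: asBoolGo cs fuel (p.toNat + pvSub.length)

def as_bool_removal (code : String) : List String :=
  (asBoolGo code.toList (code.toList.length + 1) 0).map String.ofList

-- ===== PORT B =====
-- `sub.join(parts[:i] + ["".join(parts[i:i+2])] + parts[i+2:])` for one index i
def asBoolVariant (parts : List (List Char)) (i : Int) : List Char :=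
  PySem.Chars.join pvSub
    (PySem.List.slice parts none (some i)
      ++ [PySem.Chars.join [] (PySem.List.slice parts (some i) (some (i + 2)))]
      ++ PySem.List.slice parts (some (i + 2)) none)

def as_bool_removal_alt (code : String) : List String :=
  ((PySem.List.pyRange 0 (((PySem.Chars.splitOn code.toList pvSub).length : Int) - 1)).map
      (asBoolVariant (PySem.Chars.splitOn code.toList pvSub))).map String.ofList

-- ===== PRECONDITION & SPEC =====
def Spec_as_bool_removal (code : String) (out : List String) : Prop := out = as_bool_removal_alt code
instance (code : String) (out : List String) : Decidable (Spec_as_bool_removal code out) := by unfold Spec_as_bool_removal; infer_instance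

-- ===== CLAIM (what is proved, stated in full; the proofs are below) =====
def Claim_equal_as_bool_removal : Prop := ∀ (code : String), Dom_as_bool_removal code → Spec_as_bool_removal code (as_bool_removal code)

-- ===== LEMMAS AND PROOFS =====

-- common normal form both ports are reduced to: the variants of `join pvSub parts`,
-- one per adjacent pair of pieces merged
def chainC : List (List Char) → List (List Char)
  | [] => []
  | [_] => []
  | x :: y :: r =>
      PySem.Chars.join pvSub ((x ++ y) :: r)
        :: (chainC (y :: r)).map (fun v => x ++ pvSub ++ v)

theorem pvSub_ne_nil : pvSub ≠ [] := by decide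

theorem pvSub_len_pos : 0 < pvSub.length := by decide

theorem join_cons_of_ne_nil (sep x : List Char) (l : List (List Char)) (h : l ≠ []) :
    PySem.Chars.join sep (x :: l) = x ++ sep ++ PySem.Chars.join sep l := by
  cases l with
  | nil => exact absurd rfl h
  | cons y r => exact PySem.Chars.join_cons_cons sep x y r

theorem join_append_head (sep a z : List Char) (zs : List (List Char)) :
    PySem.Chars.join sep ((a ++ z) :: zs) = a ++ PySem.Chars.join sep (z :: zs) := by
  cases zs with
  | nil => simp [PySem.Chars.join_singleton]
  | cons w r => simp [PySem.Chars.join_cons_cons]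

-- ---- facts about PySem.Chars.splitOn.go ----

theorem go_acc (sep : List Char) (fuel : Nat) : ∀ (l cur : List Char)
    (acc : List (List Char)),
    PySem.Chars.splitOn.go sep fuel l cur acc
      = acc.reverse ++ PySem.Chars.splitOn.go sep fuel l cur [] := by
  induction fuel with
  | zero => intro l cur acc; simp [PySem.Chars.splitOn.go]
  | succ f ih =>
    intro l cur acc
    cases l with
    | nil => simp [PySem.Chars.splitOn.go]
    | cons c rest =>
      simp only [PySem.Chars.splitOn.go]
      by_cases h : sep.isPrefixOf (c :: rest) = true
      · simp only [h, if_true]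
        rw [ih _ [] (cur.reverse :: acc), ih _ [] [cur.reverse]]
        simp
      · simp only [h]
        exact ih _ _ _

theorem go_len (sep : List Char) (fuel : Nat) : ∀ (l cur : List Char)
    (acc : List (List Char)),
    acc.length < (PySem.Chars.splitOn.go sep fuel l cur acc).length := by
  induction fuel with
  | zero => intro l cur acc; simp [PySem.Chars.splitOn.go]
  | succ f ih =>
    intro l cur acc
    cases l with
    | nil => simp [PySem.Chars.splitOn.go]
    | cons c rest =>
      simp only [PySem.Chars.splitOn.go]
      by_cases h : sep.isPrefixOf (c :: rest) = true
      · simp only [h, if_true]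
        have h1 := ih (List.drop sep.length (c :: rest)) [] (cur.reverse :: acc)
        simp only [List.length_cons] at h1
        omega
      · simp only [h]
        exact ih _ _ _

theorem go_fuel (sep : List Char) (hsep : sep ≠ []) (f : Nat) : ∀ (f' : Nat)
    (l cur : List Char) (acc : List (List Char)), l.length < f → l.length < f' →
    PySem.Chars.splitOn.go sep f l cur acc = PySem.Chars.splitOn.go sep f' l cur acc := by
  induction f with
  | zero => intro f' l cur acc h h'; omega
  | succ f ih =>
    intro f' l cur acc h h'
    cases f' with
    | zero => omega
    | succ g =>
      cases l with
      | nil => simp [PySem.Chars.splitOn.go]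
      | cons c rest =>
        simp only [PySem.Chars.splitOn.go]
        by_cases hp : sep.isPrefixOf (c :: rest) = true
        · simp only [hp, if_true]
          have hlen : 0 < sep.length := List.length_pos_of_ne_nil hsep
          apply ih
          · simp only [List.length_drop, List.length_cons] at *
            omega
          · simp only [List.length_drop, List.length_cons] at *
            omega
        · simp only [hp]
          apply ih
          · simp only [List.length_cons] at h; omega
          · simp only [List.length_cons] at h'; omega

theorem go_no_occ (sep : List Char) (fuel : Nat) : ∀ (l cur : List Char)
    (acc : List (List Char)), l.length < fuel → ¬ sep <:+: l →
    PySem.Chars.splitOn.go sep fuel l cur acc = ((cur.reverse ++ l) :: acc).reverse := by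
  induction fuel with
  | zero => intro l cur acc h _; omega
  | succ f ih =>
    intro l cur acc h hocc
    cases l with
    | nil => simp [PySem.Chars.splitOn.go]
    | cons c rest =>
      simp only [PySem.Chars.splitOn.go]
      have hp : sep.isPrefixOf (c :: rest) = false := by
        by_contra hne
        have : sep.isPrefixOf (c :: rest) = true := by
          cases hpp : sep.isPrefixOf (c :: rest) <;> simp_all
        exact hocc (List.IsPrefix.isInfix (List.isPrefixOf_iff_prefix.mp this))
      simp only [hp]
      rw [ih rest (c :: cur) acc (by simp at h; omega)
        (fun hc => hocc (hc.trans (List.suffix_cons c rest).isInfix))]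
      simp

theorem go_first_occ (sep : List Char) (hsep : sep ≠ []) (f : Nat) :
    ∀ (a rest cur : List Char) (acc : List (List Char)),
    (∀ i < a.length, ¬ sep <+: (a ++ sep ++ rest).drop i) →
    PySem.Chars.splitOn.go sep (f + a.length + 1) (a ++ sep ++ rest) cur acc
      = PySem.Chars.splitOn.go sep f rest [] ((cur.reverse ++ a) :: acc) := by
  intro a
  induction a with
  | nil =>
    intro rest cur acc _
    cases hs : sep with
    | nil => exact absurd hs hsep
    | cons c s' =>
      simp only [List.length_nil, Nat.add_zero, List.nil_append]
      rw [← hs]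
      have hshape : sep ++ rest = c :: (s' ++ rest) := by rw [hs]; rfl
      rw [hshape]
      simp only [PySem.Chars.splitOn.go]
      have hpre : sep.isPrefixOf (c :: (s' ++ rest)) = true := by
        rw [← hshape]
        exact List.isPrefixOf_iff_prefix.mpr (List.prefix_append sep rest)
      simp only [hpre, if_true]
      have hdrop : List.drop sep.length (c :: (s' ++ rest)) = rest := by
        rw [← hshape, List.drop_left]
      rw [hdrop]
      simp
  | cons x a' ih =>
    intro rest cur acc hmin
    have hshape : (x :: a') ++ sep ++ rest = x :: (a' ++ sep ++ rest) := by simp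
    rw [hshape]
    have : f + (x :: a').length + 1 = (f + a'.length + 1) + 1 := by
      simp [List.length_cons]; omega
    rw [this]
    simp only [PySem.Chars.splitOn.go]
    have h0 := hmin 0 (by simp)
    rw [List.drop_zero, hshape] at h0
    have hp : sep.isPrefixOf (x :: (a' ++ sep ++ rest)) = false := by
      cases hb : sep.isPrefixOf (x :: (a' ++ sep ++ rest)) with
      | false => rfl
      | true => exact absurd (List.isPrefixOf_iff_prefix.mp hb) h0
    simp only [hp]
    rw [ih rest (x :: cur) acc (fun i hi => by
      have := hmin (i + 1) (by simp; omega)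
      rw [hshape] at this
      simpa using this)]
    simp

theorem splitOn_no_occ (cs : List Char) (h : ¬ pvSub <:+: cs) :
    PySem.Chars.splitOn cs pvSub = [cs] := by
  unfold PySem.Chars.splitOn
  rw [go_no_occ pvSub (cs.length + 1) cs [] [] (by omega) h]
  simp

theorem splitOn_first_occ (a rest : List Char)
    (hmin : ∀ i < a.length, ¬ pvSub <+: (a ++ pvSub ++ rest).drop i) :
    PySem.Chars.splitOn (a ++ pvSub ++ rest) pvSub = a :: PySem.Chars.splitOn rest pvSub := by
  unfold PySem.Chars.splitOn
  have hl : (a ++ pvSub ++ rest).length + 1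
      = (pvSub.length + rest.length) + a.length + 1 := by
    simp [List.length_append]; omega
  rw [hl, go_first_occ pvSub pvSub_ne_nil (pvSub.length + rest.length) a rest [] [] hmin]
  simp only [List.reverse_nil, List.nil_append]
  rw [go_acc pvSub _ rest [] [a]]
  rw [go_fuel pvSub pvSub_ne_nil (pvSub.length + rest.length) (rest.length + 1) rest [] []
    (by have := pvSub_len_pos; omega) (by omega)]
  simp

theorem splitOn_ne_nil (cs : List Char) : PySem.Chars.splitOn cs pvSub ≠ [] := by
  unfold PySem.Chars.splitOn
  have := go_len pvSub (cs.length + 1) cs [] []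
  simp only [List.length_nil] at this
  exact List.ne_nil_of_length_pos this

-- decomposition of cs at the first occurrence of pvSub
theorem find_decomp (cs : List Char) (h : 0 ≤ PySem.Chars.find cs pvSub) :
    ∃ a rest : List Char, cs = a ++ pvSub ++ rest
      ∧ a.length = (PySem.Chars.find cs pvSub).toNat
      ∧ (∀ i < a.length, ¬ pvSub <+: (a ++ pvSub ++ rest).drop i) := by
  obtain ⟨hpre, hmin⟩ := PySem.Chars.find_spec (s := cs) (sub := pvSub) h
  set p := (PySem.Chars.find cs pvSub).toNat with hp
  have hple : p ≤ cs.length := by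
    have := PySem.Chars.find_le_length cs pvSub
    omega
  obtain ⟨t, ht⟩ := hpre
  refine ⟨cs.take p, t, ?_, ?_, ?_⟩
  · conv_lhs => rw [← List.take_append_drop p cs]
    rw [← ht, List.append_assoc]
  · simp [List.length_take, hple]
  · intro i hi
    rw [List.length_take] at hi
    have hieq : (cs.take p ++ pvSub ++ t).drop i = cs.drop i := by
      conv_rhs => rw [← List.take_append_drop p cs]
      rw [← ht, List.append_assoc]
    rw [hieq]
    exact hmin i (by omega)

theorem join_splitOn (n : Nat) : ∀ cs : List Char, cs.length ≤ n →
    PySem.Chars.join pvSub (PySem.Chars.splitOn cs pvSub) = cs := by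
  induction n with
  | zero =>
    intro cs h
    have : cs = [] := List.eq_nil_of_length_eq_zero (by omega)
    subst this
    rw [splitOn_no_occ [] (by intro hc; have := hc.length_le; have := pvSub_len_pos; simp at this; omega)]
    simp [PySem.Chars.join_singleton]
  | succ n ih =>
    intro cs h
    by_cases hocc : pvSub <:+: cs
    · have hfind : 0 ≤ PySem.Chars.find cs pvSub := by
        have := (PySem.Chars.find_ne_neg_one_iff cs pvSub).mpr hocc
        have := PySem.Chars.neg_one_le_find cs pvSub
        omega
      obtain ⟨a, rest, hdec, _, hmin⟩ := find_decomp cs hfind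
      rw [hdec, splitOn_first_occ a rest hmin,
        join_cons_of_ne_nil pvSub a _ (splitOn_ne_nil rest),
        ih rest (by rw [hdec] at h; simp [List.length_append] at h; have := pvSub_len_pos; omega)]
    · rw [splitOn_no_occ cs hocc]
      simp [PySem.Chars.join_singleton]

-- ---- facts about asBoolGo (A's loop) ----

theorem asBoolGo_shift (fuel : Nat) : ∀ (pre rest : List Char) (st : Nat),
    st ≤ rest.length →
    asBoolGo (pre ++ rest) fuel (pre.length + st)
      = (asBoolGo rest fuel st).map (fun v => pre ++ v) := by
  induction fuel with
  | zero => intro pre rest st _; simp [asBoolGo]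
  | succ f ih =>
    intro pre rest st hst
    simp only [asBoolGo]
    have hk : pre.length + st ≤ (pre ++ rest).length := by
      simp [List.length_append]; omega
    rw [PySem.Chars.findFrom_natCast (pre ++ rest) pvSub (pre.length + st) hk,
      PySem.Chars.findFrom_natCast rest pvSub st hst]
    have hdrop : (pre ++ rest).drop (pre.length + st) = rest.drop st := by
      rw [List.drop_append, List.drop_eq_nil_of_le (Nat.le_add_right _ _)]
      simp
    rw [hdrop]
    set q := PySem.Chars.find (rest.drop st) pvSub with hq
    by_cases hq1 : q = -1
    · simp [hq1]
    · have hq0 : 0 ≤ q := by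
        have := PySem.Chars.neg_one_le_find (rest.drop st) pvSub
        omega
      rw [if_neg hq1, if_neg hq1,
        if_neg (by omega : ¬ (((pre.length + st : Nat) : Int) + q = -1)),
        if_neg (by omega : ¬ ((st : Int) + q = -1))]
      obtain ⟨hpre, _⟩ := PySem.Chars.find_spec (s := rest.drop st) (sub := pvSub) hq0
      rw [List.drop_drop] at hpre
      have hlen := hpre.length_le
      rw [List.length_drop] at hlen
      have hj : st + q.toNat + pvSub.length ≤ rest.length := by
        have := pvSub_len_pos; omega
      have ht1 : (((pre.length + st : Nat) : Int) + q).toNat = pre.length + (st + q.toNat) := by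
        push_cast; omega
      have ht2 : ((st : Int) + q).toNat = st + q.toNat := by omega
      have hc1 : PySem.List.slice (pre ++ rest) none (some (((pre.length + st : Nat) : Int) + q))
          = pre ++ List.take (st + q.toNat) rest := by
        rw [PySem.List.slice_to _ (by push_cast; omega), ht1, List.take_append,
          List.take_of_length_le (Nat.le_add_right _ _)]
        simp
      have hc2 : PySem.List.slice (pre ++ rest)
          (some (((pre.length + st : Nat) : Int) + q + (pvSub.length : Int))) none
          = List.drop (st + q.toNat + pvSub.length) rest := by
        rw [PySem.List.slice_from _ (by push_cast; omega)]
        have hth : (((pre.length + st : Nat) : Int) + q + (pvSub.length : Int)).toNat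
            = pre.length + (st + q.toNat + pvSub.length) := by push_cast; omega
        rw [hth, List.drop_append, List.drop_eq_nil_of_le (Nat.le_add_right _ _)]
        simp
      have hc3 : PySem.List.slice rest none (some ((st : Int) + q))
          = List.take (st + q.toNat) rest := by
        rw [PySem.List.slice_to _ (by omega), ht2]
      have hc4 : PySem.List.slice rest (some ((st : Int) + q + (pvSub.length : Int))) none
          = List.drop (st + q.toNat + pvSub.length) rest := by
        rw [PySem.List.slice_from _ (by omega)]
        congr 1
        omega
      rw [hc1, hc2, hc3, hc4, ht1, ht2]
      rw [show pre.length + (st + q.toNat) + pvSub.length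
          = pre.length + (st + q.toNat + pvSub.length) by omega]
      rw [ih pre rest (st + q.toNat + pvSub.length) hj]
      simp [List.map_cons]

theorem asBoolGo_fuel (f : Nat) : ∀ (f' st : Nat) (cs : List Char), st ≤ cs.length →
    cs.length + 1 - st ≤ f → cs.length + 1 - st ≤ f' →
    asBoolGo cs f st = asBoolGo cs f' st := by
  induction f with
  | zero => intro f' st cs h1 h2 _; omega
  | succ f ih =>
    intro f' st cs h1 h2 h3
    cases f' with
    | zero => omega
    | succ g =>
      simp only [asBoolGo]
      by_cases hp : PySem.Chars.findFrom cs pvSub (st : Int) = -1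
      · simp [hp]
      · rw [if_neg hp, if_neg hp]
        obtain ⟨hge, hprefix, _⟩ :=
          PySem.Chars.findFrom_natCast_spec cs pvSub st h1 hp
        have hlen := hprefix.length_le
        rw [List.length_drop] at hlen
        have hst' : (PySem.Chars.findFrom cs pvSub (st : Int)).toNat + pvSub.length
            ≤ cs.length := by
          have := pvSub_len_pos; omega
        congr 1
        apply ih
        · exact hst'
        · have := pvSub_len_pos; omega
        · have := pvSub_len_pos; omega

-- ---- each port equals the normal form ----

theorem portA_eq_chainC (n : Nat) : ∀ cs : List Char, cs.length ≤ n →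
    asBoolGo cs (cs.length + 1) 0 = chainC (PySem.Chars.splitOn cs pvSub) := by
  induction n with
  | zero =>
    intro cs h
    have : cs = [] := List.eq_nil_of_length_eq_zero (by omega)
    subst this
    have hno : ¬ pvSub <:+: ([] : List Char) := by
      intro hc
      have h1 := hc.length_le
      have := pvSub_len_pos
      simp only [List.length_nil] at h1
      omega
    have hfind : PySem.Chars.find ([] : List Char) pvSub = -1 :=
      (PySem.Chars.find_eq_neg_one_iff _ _).mpr hno
    rw [splitOn_no_occ [] hno]
    simp [asBoolGo, chainC, hfind]
  | succ n ih =>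
    intro cs h
    simp only [asBoolGo]
    rw [show ((0 : Nat) : Int) = 0 by norm_num, PySem.Chars.findFrom_zero cs pvSub]
    by_cases hfind : PySem.Chars.find cs pvSub = -1
    · rw [if_pos hfind, splitOn_no_occ cs ((PySem.Chars.find_eq_neg_one_iff cs pvSub).mp hfind)]
      simp [chainC]
    · rw [if_neg hfind]
      have hf0 : 0 ≤ PySem.Chars.find cs pvSub := by
        have := PySem.Chars.neg_one_le_find cs pvSub; omega
      obtain ⟨a, rest, hdec, halen, hmin⟩ := find_decomp cs hf0
      subst hdec
      set p := PySem.Chars.find (a ++ pvSub ++ rest) pvSub with hp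
      have hlen : (a ++ pvSub ++ rest).length = a.length + pvSub.length + rest.length := by
        simp only [List.length_append]
      have hhead : PySem.List.slice (a ++ pvSub ++ rest) none (some p)
            ++ PySem.List.slice (a ++ pvSub ++ rest) (some (p + (pvSub.length : Int))) none
          = a ++ rest := by
        rw [PySem.List.slice_to _ hf0, PySem.List.slice_from _ (by have := pvSub_len_pos; omega)]
        have h1 : p.toNat = a.length := by omega
        have h2 : (p + (pvSub.length : Int)).toNat = (a ++ pvSub).length := by
          simp only [List.length_append]; omega
        rw [h1, h2]
        rw [show a ++ pvSub ++ rest = a ++ (pvSub ++ rest) by simp]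
        rw [List.take_left]
        rw [show a ++ (pvSub ++ rest) = (a ++ pvSub) ++ rest by simp]
        rw [List.drop_left]
      have htail : asBoolGo (a ++ pvSub ++ rest) (a ++ pvSub ++ rest).length
            (p.toNat + pvSub.length)
          = (chainC (PySem.Chars.splitOn rest pvSub)).map (fun v => (a ++ pvSub) ++ v) := by
        have hstart : p.toNat + pvSub.length = (a ++ pvSub).length + 0 := by
          simp only [List.length_append]; omega
        rw [hstart]
        rw [show a ++ pvSub ++ rest = (a ++ pvSub) ++ rest by simp]
        rw [asBoolGo_shift ((a ++ pvSub) ++ rest).length (a ++ pvSub) rest 0 (by omega)]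
        rw [asBoolGo_fuel ((a ++ pvSub) ++ rest).length (rest.length + 1) 0 rest (by omega)
          (by simp only [List.length_append]; have := pvSub_len_pos; omega) (by omega)]
        rw [ih rest (by simp only [List.length_append] at h; have := pvSub_len_pos; omega)]
      rw [hhead, htail]
      rw [splitOn_first_occ a rest hmin]
      cases hz : PySem.Chars.splitOn rest pvSub with
      | nil => exact absurd hz (splitOn_ne_nil rest)
      | cons z zs =>
        simp only [chainC]
        have hh : PySem.Chars.join pvSub ((a ++ z) :: zs) = a ++ rest := by
          rw [join_append_head]
          have hj : PySem.Chars.join pvSub (z :: zs) = rest := by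
            rw [← hz]; exact join_splitOn rest.length rest le_rfl
          rw [hj]
        rw [hh]

theorem variant_zero (x y : List Char) (r : List (List Char)) :
    asBoolVariant (x :: y :: r) 0 = PySem.Chars.join pvSub ((x ++ y) :: r) := by
  unfold asBoolVariant
  rw [PySem.List.slice_to _ (by norm_num), PySem.List.slice_toNat _ (by norm_num) (by norm_num),
    PySem.List.slice_from _ (by norm_num)]
  norm_num
  rw [show Int.toNat 2 = 2 from rfl]
  rw [show List.take 2 (x :: y :: r) = [x, y] from rfl,
    show List.drop 2 (x :: y :: r) = r from rfl]
  rw [show PySem.Chars.join [] [x, y] = x ++ y from by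
    rw [PySem.Chars.join_cons_cons, PySem.Chars.join_singleton]; simp]

theorem variant_succ (x : List Char) (ps : List (List Char)) (k : Nat) :
    asBoolVariant (x :: ps) ((k : Int) + 1) = x ++ pvSub ++ asBoolVariant ps (k : Int) := by
  unfold asBoolVariant
  have e1 : ((k : Int) + 1) = ((k + 1 : Nat) : Int) := by push_cast; ring
  have e2 : ((k : Int) + 1 + 2) = ((k + 3 : Nat) : Int) := by push_cast; ring
  have e3 : ((k : Int) + 2) = ((k + 2 : Nat) : Int) := by push_cast; ring
  rw [e2, e1, e3]
  rw [PySem.List.slice_to_natCast, PySem.List.slice_to_natCast,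
    PySem.List.slice_natCast, PySem.List.slice_natCast,
    PySem.List.slice_from_natCast, PySem.List.slice_from_natCast]
  rw [show List.take (k + 1) (x :: ps) = x :: List.take k ps from List.take_succ_cons,
    show List.drop (k + 1) (x :: ps) = List.drop k ps from List.drop_succ_cons,
    show List.drop (k + 3) (x :: ps) = List.drop (k + 2) ps from by
      rw [show k + 3 = (k + 2) + 1 by omega]; exact List.drop_succ_cons,
    show k + 3 - (k + 1) = 2 by omega, show k + 2 - k = 2 by omega]
  rw [show (x :: List.take k ps)
        ++ [PySem.Chars.join [] (List.take 2 (List.drop k ps))] ++ List.drop (k + 2) ps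
      = x :: (List.take k ps ++ [PySem.Chars.join [] (List.take 2 (List.drop k ps))]
        ++ List.drop (k + 2) ps) by simp]
  rw [join_cons_of_ne_nil pvSub x _ (by simp)]

theorem portB_eq_chainC (parts : List (List Char)) :
    (PySem.List.pyRange 0 ((parts.length : Int) - 1)).map (asBoolVariant parts)
      = chainC parts := by
  induction parts with
  | nil =>
    rw [show ((([] : List (List Char)).length : Int) - 1) = -1 by simp,
      PySem.List.pyRange_one_eq_nil (by norm_num)]
    simp [chainC]
  | cons x ps ih =>
    cases ps with
    | nil =>
      rw [show (([x] : List (List Char)).length : Int) - 1 = 0 by simp,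
        PySem.List.pyRange_one_eq_nil le_rfl]
      simp [chainC]
    | cons y r =>
      have hl : ((x :: y :: r).length : Int) - 1 = ((r.length + 1 : Nat) : Int) := by
        simp only [List.length_cons]; push_cast; ring
      rw [hl, PySem.List.pyRange_zero_nat (r.length + 1), List.range_succ_eq_map]
      simp only [List.map_cons, List.map_map]
      simp only [chainC]
      congr 1
      · rw [show (((0 : Nat) : Int)) = 0 by norm_num]
        exact variant_zero x y r
      · have ihr := ih
        rw [show (((y :: r).length : Int) - 1) = ((r.length : Nat) : Int) by
            simp only [List.length_cons]; push_cast; ring,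
          PySem.List.pyRange_zero_nat r.length, List.map_map] at ihr
        rw [← ihr, List.map_map]
        apply List.map_congr_left
        intro k _
        simp only [Function.comp]
        rw [show ((Nat.succ k : Nat) : Int) = (k : Int) + 1 by push_cast; ring]
        exact variant_succ x (y :: r) k

-- ===== VERDICT (by name: the statement is the Claim_ definition above) =====
theorem as_bool_removal_spec : Claim_equal_as_bool_removal := by
  intro code _
  unfold Spec_as_bool_removal as_bool_removal as_bool_removal_alt
  rw [portA_eq_chainC code.toList.length code.toList le_rfl, portB_eq_chainC]
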